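-- pv_equiv track=rewrite | github.com/juitem/OscarSeries | ElfDiffMulti/ElfDiffMulti_CustonV2_0810_last.py | normalize_user_sections_with_comma
-- ===== SOURCE A (Python) =====
-- def normalize_user_sections_with_comma(input_list):
--     """
--     Normalize user section list by splitting only on commas.
--     Args:
--         input_list (list of strings)
--     Returns:
--         set of normalized section names
--     """
--     sections = set()
--     for item in (input_list or []):
--         parts = item.split(",")
--         for token in parts:
--             token = token.strip()
--             if token:
--                 sections.add(token)
--     return sections
-- ===== SOURCE B (Python) =====
-- def normalize_user_sections_with_comma(input_list):
--     """Join everything into one comma-separated string, split it once, and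
--     build the set with a single comprehension over the combined token stream."""
--     s = ",".join(input_list or [])
--     return {t for t in (tok.strip() for tok in s.split(",")) if t}
-- ===== Notes on version B (the rewrite author's own statement) =====
-- stated objective: alternative
-- what changed: Replaced the nested per-item/per-token loops with incremental set.add by one ','.join of the whole list, a single split of the combined string, and one set comprehension over the flattened token stream.
import Mathlib
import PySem

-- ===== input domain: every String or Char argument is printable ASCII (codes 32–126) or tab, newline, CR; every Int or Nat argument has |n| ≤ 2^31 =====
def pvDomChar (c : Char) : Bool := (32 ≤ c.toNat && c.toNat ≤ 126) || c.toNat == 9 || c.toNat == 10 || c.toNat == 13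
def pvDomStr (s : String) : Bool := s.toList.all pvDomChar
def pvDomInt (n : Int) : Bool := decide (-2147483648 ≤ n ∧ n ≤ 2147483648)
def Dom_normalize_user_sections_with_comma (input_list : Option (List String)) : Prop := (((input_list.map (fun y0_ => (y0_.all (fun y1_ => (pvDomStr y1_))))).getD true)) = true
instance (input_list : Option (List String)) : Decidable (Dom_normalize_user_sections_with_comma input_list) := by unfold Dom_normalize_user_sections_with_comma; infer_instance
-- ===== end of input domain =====

-- B replaces A's nested per-item/per-token loops (incremental set.add) by one ",".join,
-- a single split of the combined string, and one set comprehension over the token stream.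

-- ===== PORT A =====
-- sections = set(); for item in (input_list or []): for token in item.split(","):
--     token = token.strip(); if token: sections.add(token)
-- `input_list or []`: None -> []; any list is used as-is (an empty list also yields []).
-- item.split(",") never raises since the separator is the nonempty literal ",": split? is always `some`.
def normalize_user_sections_with_comma (input_list : Option (List String)) : List String :=
  (input_list.getD []).foldl
    (fun sections item =>
      ((PySem.Str.split? item ",").getD []).foldl
        (fun sections token =>
          let token := PySem.Str.strip token
          if token != "" then PySem.Set.add sections token else sections)
        sections)
    PySem.Set.empty

-- ===== PORT B =====
-- s = ",".join(input_list or []); return {t for t in (tok.strip() for tok in s.split(",")) if t}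
def normalize_user_sections_with_comma_alt (input_list : Option (List String)) : List String :=
  let s := PySem.Str.join "," (input_list.getD [])
  PySem.Set.ofList
    ((((PySem.Str.split? s ",").getD []).map PySem.Str.strip).filter (fun t => t != ""))

-- ===== PRECONDITION & SPEC =====
def Spec_normalize_user_sections_with_comma (input_list : Option (List String)) (out : List String) : Prop := out = normalize_user_sections_with_comma_alt input_list
instance (input_list : Option (List String)) (out : List String) : Decidable (Spec_normalize_user_sections_with_comma input_list out) := by unfold Spec_normalize_user_sections_with_comma; infer_instance

-- ===== CLAIM (what is proved, stated in full; the proofs are below) =====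
def Claim_equal_normalize_user_sections_with_comma : Prop := ∀ (input_list : Option (List String)), Dom_normalize_user_sections_with_comma input_list → Spec_normalize_user_sections_with_comma input_list (normalize_user_sections_with_comma input_list)

-- ===== LEMMAS AND PROOFS =====

-- Reference splitter: what splitting a char list on the single separator ',' produces.
def pvSp : List Char → List (List Char)
  | [] => [[]]
  | c :: rest => if c = ',' then [] :: pvSp rest else (pvSp rest).modifyHead (c :: ·)

theorem pvSp_ne_nil (l : List Char) : pvSp l ≠ [] := by
  cases l with
  | nil => simp [pvSp]
  | cons c rest =>
    simp only [pvSp]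
    split_ifs
    · simp
    · cases h : pvSp rest with
      | nil => exact absurd h (pvSp_ne_nil rest)
      | cons a t => simp

theorem pvGo_eq (fuel : Nat) (l cur : List Char) (acc : List (List Char))
    (h : l.length ≤ fuel) :
    PySem.Chars.splitOn.go [','] fuel l cur acc
      = acc.reverse ++ (pvSp l).modifyHead (cur.reverse ++ ·) := by
  induction fuel generalizing l cur acc with
  | zero =>
    have : l = [] := List.length_eq_zero_iff.mp (Nat.le_zero.mp h)
    subst this
    simp [PySem.Chars.splitOn.go, pvSp]
  | succ n ih =>
    cases l with
    | nil => simp [PySem.Chars.splitOn.go, pvSp]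
    | cons c rest =>
      rw [PySem.Chars.splitOn.go]
      by_cases hc : c = ','
      · subst hc
        simp only [List.isPrefixOf, BEq.rfl, Bool.true_and,
          if_pos, List.length_cons, List.length_nil, List.drop_succ_cons, List.drop_zero]
        rw [ih rest [] (cur.reverse :: acc) (by simpa using h)]
        cases hr : pvSp rest with
        | nil => exact absurd hr (pvSp_ne_nil rest)
        | cons a t => simp [pvSp, hr]
      · have hpre : [','].isPrefixOf (c :: rest) = false := by
          simp only [List.isPrefixOf, Bool.and_true,
            beq_eq_false_iff_ne, ne_eq]
          exact fun h => hc h.symm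
        simp only [hpre, Bool.false_eq_true, if_false]
        rw [ih rest (c :: cur) acc (by simpa using Nat.lt_succ_iff.mp (by simpa using h))]
        cases hr : pvSp rest with
        | nil => exact absurd hr (pvSp_ne_nil rest)
        | cons a t => simp [pvSp, hc, hr]

theorem pvSplitOn_comma (l : List Char) : PySem.Chars.splitOn l [','] = pvSp l := by
  rw [PySem.Chars.splitOn, pvGo_eq _ _ _ _ (Nat.le_succ _)]
  cases h : pvSp l with
  | nil => exact absurd h (pvSp_ne_nil l)
  | cons a t => simp

theorem pvSp_append (x y : List Char) : pvSp (x ++ ',' :: y) = pvSp x ++ pvSp y := by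
  induction x with
  | nil => simp [pvSp]
  | cons c rest ih =>
    by_cases hc : c = ','
    · subst hc; simp [pvSp, ih]
    · simp only [List.cons_append, pvSp, hc, if_false, ih]
      cases h : pvSp rest with
      | nil => exact absurd h (pvSp_ne_nil rest)
      | cons a t => simp

theorem pvSp_join (p : List Char) (ps : List (List Char)) :
    pvSp (PySem.Chars.join [','] (p :: ps)) = pvSp p ++ ps.flatMap pvSp := by
  induction ps generalizing p with
  | nil => simp [PySem.Chars.join_singleton]
  | cons q rest ih =>
    rw [PySem.Chars.join_cons_cons]
    have : p ++ [','] ++ PySem.Chars.join [','] (q :: rest)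
        = p ++ ',' :: PySem.Chars.join [','] (q :: rest) := by simp
    rw [this, pvSp_append, ih]
    simp

-- the token stream of A's nested split equals the token stream of B's single split of the join
theorem pvTokens_join (i : String) (is : List String) :
    (PySem.Str.split? (PySem.Str.join "," (i :: is)) ",").getD []
      = (i :: is).flatMap (fun it => (PySem.Str.split? it ",").getD []) := by
  have hsep : ("," : String).toList = [','] := by decide
  simp only [PySem.Str.split?, PySem.Chars.split?, hsep, List.isEmpty_cons,
    Bool.false_eq_true, if_false, Option.map_some, Option.getD_some,
    PySem.Str.join, String.toList_ofList, pvSplitOn_comma, List.map_cons,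
    pvSp_join, List.map_append]
  rw [List.flatMap_cons]
  congr 1
  induction is with
  | nil => simp
  | cons q rest ih => simp_all [List.flatMap_cons]

-- folding A's inner loop over each item = folding once over the flattened token stream
theorem pvFoldl_flat (toks : String → List String)
    (step : List String → String → List String) :
    ∀ (items : List String) (s0 : List String),
      items.foldl (fun s it => (toks it).foldl step s) s0
        = (items.flatMap toks).foldl step s0 := by
  intro items
  induction items with
  | nil => intro s0; simp
  | cons i is ih => intro s0; simp [List.foldl_append, ih]

-- A's conditional add over raw tokens = plain Set.add over the stripped, filtered tokens
theorem pvFoldl_filter :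
    ∀ (toks : List String) (s0 : List String),
      toks.foldl
        (fun s token =>
          let token := PySem.Str.strip token
          if token != "" then PySem.Set.add s token else s) s0
        = ((toks.map PySem.Str.strip).filter (fun t => t != "")).foldl PySem.Set.add s0 := by
  intro toks
  induction toks with
  | nil => intro s0; simp
  | cons t ts ih =>
    intro s0
    simp only [List.foldl_cons, List.map_cons, List.filter_cons]
    rw [ih]
    by_cases h : PySem.Str.strip t = ""
    · simp [h]
    · simp [h]

theorem pvMain (input_list : Option (List String)) :
    normalize_user_sections_with_comma input_list
      = normalize_user_sections_with_comma_alt input_list := by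
  match input_list with
  | none => decide
  | some [] => decide
  | some (i :: is) =>
    unfold normalize_user_sections_with_comma normalize_user_sections_with_comma_alt
    simp only [Option.getD_some]
    rw [pvFoldl_flat, pvFoldl_filter, pvTokens_join, PySem.Set.ofList_eq_foldl]
    rfl

-- ===== VERDICT (by name: the statement is the Claim_ definition above) =====
theorem normalize_user_sections_with_comma_spec : Claim_equal_normalize_user_sections_with_comma := by
  intro input_list _
  unfold Spec_normalize_user_sections_with_comma
  exact pvMain input_list
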